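-- pv_equiv track=rewrite | github.com/cognitivefactory/interactive-clustering | src/cognitivefactory/interactive_clustering/clustering/abstract.py | rename_clusters_by_order
-- ===== SOURCE A (Python) =====
-- from typing import Dict  # To type Python code (mypy).
--
-- def rename_clusters_by_order(
--     clusters: Dict[str, int],
-- ) -> Dict[str, int]:
--     """
--     Rename cluster ID to be ordered by data IDs.
--
--     Args:
--         clusters (Dict[str, int]): The dictionary of clusters.
--
--     Returns:
--         Dict[str, int]: The sorted dictionary of clusters.
--     """
--
--     # Get `list_of_data_IDs`.
--     list_of_data_IDs = sorted(clusters.keys())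
--
--     # Define a map to be able to rename cluster IDs.
--     mapping_of_old_ID_to_new_ID: Dict[int, int] = {}
--     new_ID: int = 0
--     for data_ID in list_of_data_IDs:  # , cluster_ID in clusters.items():
--         if clusters[data_ID] not in mapping_of_old_ID_to_new_ID.keys():
--             mapping_of_old_ID_to_new_ID[clusters[data_ID]] = new_ID
--             new_ID += 1
--
--     # Rename cluster IDs.
--     new_clusters = {
--         data_ID_to_assign: mapping_of_old_ID_to_new_ID[clusters[data_ID_to_assign]]
--         for data_ID_to_assign in list_of_data_IDs
--     }
--
--     # Return the new ordered clusters
--     return new_clusters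
-- ===== SOURCE B (Python) =====
-- def rename_clusters_by_order(clusters):
--     """Per-element closed form: the new ID of a data ID's cluster is the number of
--     distinct cluster IDs appearing strictly before that cluster's first occurrence
--     in the values listed by sorted data ID (no incremental mapping dict)."""
--     ks = sorted(clusters.keys())
--     vals = [clusters[k] for k in ks]
--     return {k: len(set(vals[:vals.index(v)])) for k, v in zip(ks, vals)}
-- ===== Notes on version B (the rewrite author's own statement) =====
-- stated objective: simpler
-- what changed: A builds an incremental old-ID-to-new-ID dict with a running counter while scanning sorted keys; B has no mapping dict at all and computes each new ID by a per-element closed form: the number of distinct cluster IDs occurring before that cluster's first occurrence in the values listed by sorted data ID.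
import Mathlib
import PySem

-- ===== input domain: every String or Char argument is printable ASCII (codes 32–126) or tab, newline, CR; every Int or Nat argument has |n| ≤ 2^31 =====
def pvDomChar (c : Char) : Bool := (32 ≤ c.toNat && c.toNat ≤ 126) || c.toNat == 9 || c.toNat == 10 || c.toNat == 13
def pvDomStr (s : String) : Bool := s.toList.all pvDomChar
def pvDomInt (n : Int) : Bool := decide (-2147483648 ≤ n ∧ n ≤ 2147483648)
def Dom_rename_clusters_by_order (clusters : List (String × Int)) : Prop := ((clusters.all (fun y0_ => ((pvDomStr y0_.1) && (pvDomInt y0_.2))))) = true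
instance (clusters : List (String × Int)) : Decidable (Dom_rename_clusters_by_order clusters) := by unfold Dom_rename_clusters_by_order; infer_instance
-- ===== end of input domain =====

-- B replaces A's incrementally built renaming dict by a per-element closed form
-- (distinct clusters before the first occurrence); objective: simpler, not faster.

-- ===== PORT A =====
-- the body of A's 'for data_ID in list_of_data_IDs' loop (state = (mapping_of_old_ID_to_new_ID, new_ID))
def pvMapStep (p : PySem.Dict Int Int × Int) (v : Int) : PySem.Dict Int Int × Int :=
  if p.1.contains v = false then (p.1.insert v p.2, p.2 + 1) else p

def rename_clusters_by_order (clusters : List (String × Int)) : List (String × Int) :=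
  let d := PySem.Dict.ofList clusters
  let list_of_data_IDs := PySem.List.sorted d.keys (fun x => x) false
  -- clusters[data_ID] never raises (data_ID ∈ keys), so getD with default 0 is exact
  let st := list_of_data_IDs.foldl (fun p data_ID => pvMapStep p (d.getD data_ID 0)) (PySem.Dict.empty, 0)
  list_of_data_IDs.map (fun data_ID_to_assign => (data_ID_to_assign, st.1.getD (d.getD data_ID_to_assign 0) 0))

-- ===== PORT B =====
-- Source B: len(set(vals[:vals.index(v)]))  (vals[:j] with 0 ≤ j = take j, exact)
def pvNewID (vals : List Int) (v : Int) : Int :=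
  ((PySem.Set.ofList (vals.take ((PySem.List.index? vals v).getD 0))).length : Int)

def rename_clusters_by_order_alt (clusters : List (String × Int)) : List (String × Int) :=
  let d := PySem.Dict.ofList clusters
  let ks := PySem.List.sorted d.keys (fun x => x) false
  let vals := ks.map (fun k => d.getD k 0)
  (ks.zip vals).map (fun kv => (kv.1, pvNewID vals kv.2))

-- ===== PRECONDITION & SPEC =====
def Spec_rename_clusters_by_order (clusters : List (String × Int)) (out : List (String × Int)) : Prop := out = rename_clusters_by_order_alt clusters
instance (clusters : List (String × Int)) (out : List (String × Int)) : Decidable (Spec_rename_clusters_by_order clusters out) := by unfold Spec_rename_clusters_by_order; infer_instance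

-- ===== CLAIM (what is proved, stated in full; the proofs are below) =====
def Claim_equal_rename_clusters_by_order : Prop := ∀ (clusters : List (String × Int)), Dom_rename_clusters_by_order clusters → Spec_rename_clusters_by_order clusters (rename_clusters_by_order clusters)

-- ===== LEMMAS AND PROOFS =====

lemma pvNewID_append (p t : List Int) (v : Int) (hv : v ∈ p) :
    pvNewID (p ++ t) v = pvNewID p v := by
  unfold pvNewID
  rw [PySem.List.index?_append_of_mem t hv]
  rcases PySem.List.index?_isSome_iff (xs := p) (v := v) |>.mpr hv |> Option.isSome_iff_exists.mp with ⟨k, hk⟩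
  rcases PySem.List.getElem_of_index?_eq_some hk with ⟨hlt, -, -⟩
  rw [hk]
  simp [List.take_append_of_le_length (le_of_lt hlt)]

lemma pvNewID_append_self (p : List Int) (a : Int) (ha : a ∉ p) :
    pvNewID (p ++ [a]) a = ((PySem.Set.ofList p).length : Int) := by
  unfold pvNewID
  have hidx : PySem.List.index? (p ++ [a]) a = some p.length :=
    PySem.List.index?_append_singleton_self p a ha
  rw [hidx]
  simp

lemma pvState_spec (vs : List Int) :
    (vs.foldl pvMapStep (PySem.Dict.empty, 0)).2 = ((PySem.Set.ofList vs).length : Int)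
    ∧ ∀ v : Int, (vs.foldl pvMapStep (PySem.Dict.empty, 0)).1.get? v =
        if v ∈ vs then some (pvNewID vs v) else none := by
  induction vs using List.reverseRecOn with
  | nil => simp [PySem.Dict.get?_empty, PySem.Set.ofList]
  | append_singleton p a ih =>
    obtain ⟨ih2, ih1⟩ := ih
    rw [List.foldl_append]
    simp only [List.foldl_cons, List.foldl_nil]
    have hcont : (p.foldl pvMapStep (PySem.Dict.empty, 0)).1.contains a
        = decide (a ∈ p) := by
      rw [PySem.Dict.contains_eq_isSome_get?, ih1 a]
      by_cases ha : a ∈ p <;> simp [ha]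
    by_cases ha : a ∈ p
    · have hstep : pvMapStep (p.foldl pvMapStep (PySem.Dict.empty, 0)) a
          = p.foldl pvMapStep (PySem.Dict.empty, 0) := by
        simp [pvMapStep, hcont, ha]
      rw [hstep]
      constructor
      · rw [ih2]; simp [pysem, ha]
      · intro v
        rw [ih1 v]
        by_cases hv : v ∈ p
        · simp [hv, pvNewID_append p [a] v hv]
        · have : ¬ v ∈ p ++ [a] := by
            simp [hv]; rintro rfl; exact hv ha
          simp [hv, this]
    · have hstep : pvMapStep (p.foldl pvMapStep (PySem.Dict.empty, 0)) a
          = ((p.foldl pvMapStep (PySem.Dict.empty, 0)).1.insert a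
               (p.foldl pvMapStep (PySem.Dict.empty, 0)).2,
             (p.foldl pvMapStep (PySem.Dict.empty, 0)).2 + 1) := by
        simp [pvMapStep, hcont, ha]
      rw [hstep]
      constructor
      · simp only []
        rw [ih2]
        have : PySem.Set.ofList (p ++ [a]) = PySem.Set.ofList p ++ [a] := by
          simp [pysem, ha]
        rw [this]
        simp only [List.length_append, List.length_cons, List.length_nil]
        push_cast
        omega
      · intro v
        by_cases hva : v = a
        · subst hva
          rw [PySem.Dict.get?_insert_self, ih2, pvNewID_append_self p v ha]
          simp
        · rw [PySem.Dict.get?_insert_of_ne _ _ hva, ih1 v]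
          by_cases hv : v ∈ p
          · simp [hv, pvNewID_append p [a] v hv]
          · have : ¬ v ∈ p ++ [a] := by simp [hv, hva]
            simp [hv, this]

lemma pvZipMap {α β γ : Type} (ks : List α) (f : α → β) (g : β → γ) :
    (ks.zip (ks.map f)).map (fun kv => (kv.1, g kv.2)) = ks.map (fun k => (k, g (f k))) := by
  induction ks with
  | nil => rfl
  | cons k t ih => simp [ih]

-- ===== VERDICT (by name: the statement is the Claim_ definition above) =====
theorem rename_clusters_by_order_spec : Claim_equal_rename_clusters_by_order := by
  intro clusters _
  unfold Spec_rename_clusters_by_order rename_clusters_by_order rename_clusters_by_order_alt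
  dsimp only
  set d := PySem.Dict.ofList clusters with hd
  set ks := PySem.List.sorted d.keys (fun x => x) false with hks
  rw [pvZipMap ks (fun k => d.getD k 0) (pvNewID (ks.map (fun k => d.getD k 0)))]
  have hfold : ks.foldl (fun p data_ID => pvMapStep p (d.getD data_ID 0)) (PySem.Dict.empty, 0)
      = (ks.map (fun k => d.getD k 0)).foldl pvMapStep (PySem.Dict.empty, 0) := by
    rw [List.foldl_map]
  rw [hfold]
  apply List.map_congr_left
  intro k hk
  have hv : d.getD k 0 ∈ ks.map (fun k => d.getD k 0) := List.mem_map_of_mem hk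
  rcases pvState_spec (ks.map (fun k => d.getD k 0)) with ⟨-, h1⟩
  rw [PySem.Dict.getD_eq_get?_getD, h1 (d.getD k 0)]
  simp [hv]
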